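-- pv_equiv track=rewrite | github.com/BaldeGi/BAC | BAC1/INFO1/Exam_blanc_et_Entrainements/Exercices_entrainement.py | sommes_sous_ensemble
-- ===== SOURCE A (Python) =====
-- def sommes_sous_ensemble(l,n):
--     """
--     pre: l est une liste(potentiellement vide) d'entiers et n un entier,
--     post: Retourne True si l co,tie,t un sous ensembles de valerurs dont la somme
--     est egale à n et False sinon(la somme d'un sous ensemble vide peut être considerer
--     comme 0)
--     """
--     for i in range(len(l)):
--         if l[i]==n:
--             return True
--         for j in range(1,len(l)):
--             if i!=j:
--                 if l[i]+l[j]==n: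
--                     return True
--             for k in range(2,len(l)):
--                 if (i!=j and i!=k) and (j!=k ):
--                     if l[i]+l[j]+l[k]==n:
--                         return True
--     return False
-- ===== SOURCE B (Python) =====
-- def _two_sum(xs, t):
--     # True iff two elements at distinct positions of xs sum to t (hash-set scan).
--     seen = set()
--     for x in xs:
--         if t - x in seen:
--             return True
--         seen.add(x)
--     return False
--
-- def sommes_sous_ensemble(l, n):
--     if n in set(l):
--         return True
--     if _two_sum(l, n):
--         return True
--     for i in range(len(l)):
--         if _two_sum(l[i+1:], n - l[i]):
--             return True
--     return False
-- ===== Notes on version B (the rewrite author's own statement) =====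
-- stated objective: faster
-- what changed: Replaces the triple nested index scan by a set membership test for singletons, a hash-set two-sum scan for pairs, and one two-sum scan over the suffix for each triple anchor, removing the inner quadratic scans.
import Mathlib
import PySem

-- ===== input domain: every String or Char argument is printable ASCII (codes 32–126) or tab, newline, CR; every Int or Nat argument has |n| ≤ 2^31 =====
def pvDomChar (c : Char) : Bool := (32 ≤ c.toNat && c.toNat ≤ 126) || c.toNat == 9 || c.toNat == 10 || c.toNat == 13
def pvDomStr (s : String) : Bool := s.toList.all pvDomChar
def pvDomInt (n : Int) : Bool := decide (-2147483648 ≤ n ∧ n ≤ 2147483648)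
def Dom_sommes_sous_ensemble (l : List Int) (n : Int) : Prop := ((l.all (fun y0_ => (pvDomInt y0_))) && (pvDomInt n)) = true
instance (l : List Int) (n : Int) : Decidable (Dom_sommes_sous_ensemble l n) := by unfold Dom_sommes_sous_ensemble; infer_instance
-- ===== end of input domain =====

-- B replaces A's O(n^3) triple index scan by set/hash-set two-sum scans (O(n^2)); return values proved equal.

-- ===== PORT A =====
-- literal transliteration of A's nested loops; early 'return True' of a pure search = List.any
def sommes_sous_ensemble (l : List Int) (n : Int) : Bool :=
  (PySem.List.pyRange 0 l.length 1).any (fun i =>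
    (PySem.List.pyGetD l i 0 == n) ||
    (PySem.List.pyRange 1 l.length 1).any (fun j =>
      ((i != j) && (PySem.List.pyGetD l i 0 + PySem.List.pyGetD l j 0 == n)) ||
      (PySem.List.pyRange 2 l.length 1).any (fun k =>
        (((i != j) && (i != k)) && (j != k)) &&
          (PySem.List.pyGetD l i 0 + PySem.List.pyGetD l j 0 + PySem.List.pyGetD l k 0 == n))))

-- ===== PORT B =====
-- _two_sum: hash-set scan, seen = set of elements already passed
def pvTwoSumAux (t : Int) (seen : PySem.Set Int) : List Int → Bool
  | [] => false
  | x :: xs => if PySem.Set.contains seen (t - x) then true else pvTwoSumAux t (PySem.Set.add seen x) xs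

def pvTwoSum (xs : List Int) (t : Int) : Bool := pvTwoSumAux t PySem.Set.empty xs

def sommes_sous_ensemble_alt (l : List Int) (n : Int) : Bool :=
  if PySem.Set.contains (PySem.Set.ofList l) n then true
  else if pvTwoSum l n then true
  else (PySem.List.pyRange 0 l.length 1).any (fun i =>
    pvTwoSum (PySem.List.slice l (some (i + 1)) none) (n - PySem.List.pyGetD l i 0))

-- ===== PRECONDITION & SPEC =====
def Spec_sommes_sous_ensemble (l : List Int) (n : Int) (out : Bool) : Prop := out = sommes_sous_ensemble_alt l n
instance (l : List Int) (n : Int) (out : Bool) : Decidable (Spec_sommes_sous_ensemble l n out) := by unfold Spec_sommes_sous_ensemble; infer_instance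

-- ===== CLAIM (what is proved, stated in full; the proofs are below) =====
def Claim_equal_sommes_sous_ensemble : Prop := ∀ (l : List Int) (n : Int), Dom_sommes_sous_ensemble l n → Spec_sommes_sous_ensemble l n (sommes_sous_ensemble l n)

-- ===== LEMMAS AND PROOFS =====

-- common specification: some 1/2/3 elements taken at increasing positions (a sublist) sum to n
def HasSub (l : List Int) (n : Int) : Prop :=
  (n ∈ l) ∨ (∃ a b, [a, b].Sublist l ∧ a + b = n) ∨ (∃ a b c, [a, b, c].Sublist l ∧ a + b + c = n)

-- index → sublist
theorem pair_of_lt {l : List Int} {i j : Nat} (hij : i < j) (hj : j < l.length) :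
    [l[i], l[j]].Sublist l := by
  have hi : i < l.length := lt_trans hij hj
  have hmem : l[j] ∈ List.drop (i + 1) l := by
    have hj' : j - (i + 1) < (List.drop (i + 1) l).length := by
      simp [List.length_drop]; omega
    have : (List.drop (i + 1) l)[j - (i + 1)] = l[j] := by
      rw [List.getElem_drop]; congr 1; omega
    exact this ▸ List.getElem_mem hj'
  have h1 : [l[i], l[j]].Sublist (l[i] :: List.drop (i + 1) l) :=
    List.Sublist.cons₂ _ (List.singleton_sublist.mpr hmem)
  have h2 : l[i] :: List.drop (i + 1) l = List.drop i l := (List.drop_eq_getElem_cons hi).symm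
  exact (h2 ▸ h1).trans (List.drop_sublist i l)

theorem triple_of_lt {l : List Int} {i j k : Nat} (hij : i < j) (hjk : j < k) (hk : k < l.length) :
    [l[i], l[j], l[k]].Sublist l := by
  have hi : i < l.length := by omega
  have hdl : j - (i+1) < (List.drop (i+1) l).length := by simp [List.length_drop]; omega
  have hdk : k - (i+1) < (List.drop (i+1) l).length := by simp [List.length_drop]; omega
  have hpair : [(List.drop (i+1) l)[j - (i+1)], (List.drop (i+1) l)[k - (i+1)]].Sublist (List.drop (i+1) l) :=
    pair_of_lt (by omega) hdk
  have ej : (List.drop (i+1) l)[j - (i+1)] = l[j] := by rw [List.getElem_drop]; congr 1; omega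
  have ek : (List.drop (i+1) l)[k - (i+1)] = l[k] := by rw [List.getElem_drop]; congr 1; omega
  rw [ej, ek] at hpair
  have h1 : [l[i], l[j], l[k]].Sublist (l[i] :: List.drop (i + 1) l) :=
    List.Sublist.cons₂ _ hpair
  have h2 : l[i] :: List.drop (i + 1) l = List.drop i l := (List.drop_eq_getElem_cons hi).symm
  exact (h2 ▸ h1).trans (List.drop_sublist i l)

-- sublist → index
theorem cons_sublist_to_index {a : Int} {s l : List Int} (h : (a :: s).Sublist l) :
    ∃ i : Nat, ∃ hi : i < l.length, l[i] = a ∧ s.Sublist (List.drop (i + 1) l) := by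
  induction l with
  | nil => simp at h
  | cons x xs ih =>
    rcases List.sublist_cons_iff.mp h with h' | ⟨r, hr, hrs⟩
    · obtain ⟨i, hi, he, hs⟩ := ih h'
      exact ⟨i + 1, by simpa using Nat.succ_lt_succ hi, by simpa using he, by simpa using hs⟩
    · cases hr
      exact ⟨0, by simp, rfl, by simpa using hrs⟩

theorem pair_to_indices {a b : Int} {l : List Int} (h : [a, b].Sublist l) :
    ∃ i j : Nat, ∃ hij : i < j, ∃ hj : j < l.length, l[i]'(by omega) = a ∧ l[j] = b := by
  obtain ⟨i, hi, he, hs⟩ := cons_sublist_to_index h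
  have hb : b ∈ List.drop (i + 1) l := List.singleton_sublist.mp hs
  obtain ⟨j', hj', he'⟩ := List.mem_iff_getElem.mp hb
  rw [List.getElem_drop] at he'
  refine ⟨i, i + 1 + j', by omega, by have := hj'; simp [List.length_drop] at this; omega, he, he'⟩

theorem triple_to_indices {a b c : Int} {l : List Int} (h : [a, b, c].Sublist l) :
    ∃ i j k : Nat, ∃ hij : i < j, ∃ hjk : j < k, ∃ hk : k < l.length,
      l[i]'(by omega) = a ∧ l[j]'(by omega) = b ∧ l[k] = c := by
  obtain ⟨i, hi, he, hs⟩ := cons_sublist_to_index h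
  obtain ⟨j', k', hj'k', hk', hej, hek⟩ := pair_to_indices hs
  rw [List.getElem_drop] at hej hek
  have hlen : (List.drop (i+1) l).length = l.length - (i+1) := by simp
  refine ⟨i, i + 1 + j', i + 1 + k', by omega, by omega, by omega, he, hej, hek⟩

-- B-side: the two-sum scan finds exactly the 2-element sublists
theorem twoSumAux_iff (t : Int) (xs : List Int) : ∀ seen : PySem.Set Int,
    (pvTwoSumAux t seen xs = true ↔
      (∃ x ∈ xs, (t - x) ∈ seen) ∨ (∃ a b, [a, b].Sublist xs ∧ a + b = t)) := by
  induction xs with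
  | nil => intro seen; simp [pvTwoSumAux]
  | cons x xs ih =>
    intro seen
    by_cases hc : (t - x) ∈ seen
    · have hcb : PySem.Set.contains seen (t - x) = true := (PySem.Set.contains_iff _ _).mpr hc
      constructor
      · intro _; exact Or.inl ⟨x, List.mem_cons_self, hc⟩
      · intro _; simp only [pvTwoSumAux]; simp; exact Or.inl hc
    · have hcb : PySem.Set.contains seen (t - x) = false := by
        rw [Bool.eq_false_iff]
        intro h; exact hc ((PySem.Set.contains_iff _ _).mp h)
      have hstep : pvTwoSumAux t seen (x :: xs) = pvTwoSumAux t (PySem.Set.add seen x) xs := by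
        simp only [pvTwoSumAux]; simp; intro h; exact absurd h hc
      rw [hstep, ih (PySem.Set.add seen x)]
      constructor
      · rintro (⟨y, hy, hmem⟩ | ⟨a, b, hsub, hab⟩)
        · rcases (PySem.Set.mem_add seen x (t - y)).mp hmem with h | h
          · exact Or.inl ⟨y, by simp [hy], h⟩
          · exact Or.inr ⟨x, y, by
              exact ⟨List.Sublist.cons₂ _ (List.singleton_sublist.mpr hy), by omega⟩⟩
        · exact Or.inr ⟨a, b, hsub.trans (List.sublist_cons_self x xs), hab⟩
      · rintro (⟨y, hy, hmem⟩ | ⟨a, b, hsub, hab⟩)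
        · rcases List.mem_cons.mp hy with rfl | hy'
          · exact absurd hmem hc
          · exact Or.inl ⟨y, hy', (PySem.Set.mem_add seen x (t - y)).mpr (Or.inl hmem)⟩
        · rcases List.sublist_cons_iff.mp hsub with h' | ⟨r, hr, hrs⟩
          · exact Or.inr ⟨a, b, h', hab⟩
          · cases hr
            exact Or.inl ⟨b, List.singleton_sublist.mp hrs,
              (PySem.Set.mem_add seen x (t - b)).mpr (Or.inr (by omega))⟩

theorem twoSum_iff (xs : List Int) (t : Int) :
    pvTwoSum xs t = true ↔ ∃ a b, [a, b].Sublist xs ∧ a + b = t := by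
  rw [pvTwoSum, twoSumAux_iff]
  simp [PySem.Set.empty]

-- B-side: the per-anchor suffix two-sum scans find exactly the 3-element sublists
theorem anchor_iff (l : List Int) (n : Int) :
    ((PySem.List.pyRange 0 l.length 1).any (fun i =>
      pvTwoSum (PySem.List.slice l (some (i + 1)) none) (n - PySem.List.pyGetD l i 0)) = true)
    ↔ ∃ a b c, [a, b, c].Sublist l ∧ a + b + c = n := by
  rw [PySem.List.pyRange_zero_natCast l.length, List.any_map]
  simp only [List.any_eq_true, List.mem_range, Function.comp]
  constructor
  · rintro ⟨m, hm, hts⟩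
    have hc : ((m : Int) + 1) = ((m + 1 : Nat) : Int) := by push_cast; ring
    rw [hc, PySem.List.slice_from_natCast, PySem.List.pyGetD_natCast,
      List.getD_eq_getElem l 0 hm] at hts
    obtain ⟨a, b, hsub, hab⟩ := (twoSum_iff _ _).mp hts
    have h1 : [l[m], a, b].Sublist (l[m] :: List.drop (m + 1) l) :=
      List.Sublist.cons₂ _ hsub
    have h2 : l[m] :: List.drop (m + 1) l = List.drop m l := (List.drop_eq_getElem_cons hm).symm
    exact ⟨l[m], a, b, (h2 ▸ h1).trans (List.drop_sublist m l), by omega⟩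
  · rintro ⟨a, b, c, hsub, habc⟩
    obtain ⟨i, hi, he, hs⟩ := cons_sublist_to_index hsub
    refine ⟨i, hi, ?_⟩
    have hc : ((i : Int) + 1) = ((i + 1 : Nat) : Int) := by push_cast; ring
    rw [hc, PySem.List.slice_from_natCast, PySem.List.pyGetD_natCast,
      List.getD_eq_getElem l 0 hi]
    exact (twoSum_iff _ _).mpr ⟨b, c, hs, by omega⟩

-- B-side: whole function
theorem alt_iff (l : List Int) (n : Int) : sommes_sous_ensemble_alt l n = true ↔ HasSub l n := by
  unfold sommes_sous_ensemble_alt HasSub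
  have h1 : PySem.Set.contains (PySem.Set.ofList l) n = true ↔ n ∈ l :=
    (PySem.Set.contains_iff _ _).trans (PySem.Set.mem_ofList l n)
  split_ifs with hs hp
  · simp [h1.mp hs]
  · simp [(twoSum_iff l n).mp hp]
  · rw [anchor_iff]
    constructor
    · intro h; exact Or.inr (Or.inr h)
    · rintro (hmem | ⟨a, b, hsub, hab⟩ | h)
      · exact absurd (h1.mpr hmem) hs
      · exact absurd ((twoSum_iff l n).mpr ⟨a, b, hsub, hab⟩) hp
      · exact h

-- A-side
theorem a_iff (l : List Int) (n : Int) : sommes_sous_ensemble l n = true ↔ HasSub l n := by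
  unfold sommes_sous_ensemble HasSub
  simp only [List.any_eq_true, PySem.List.mem_pyRange_one, Bool.or_eq_true, Bool.and_eq_true,
    beq_iff_eq, bne_iff_ne]
  constructor
  · rintro ⟨i, ⟨hi0, hil⟩, hbody⟩
    have hil' : i.toNat < l.length := by omega
    have hgi : PySem.List.pyGetD l i 0 = l[i.toNat] :=
      PySem.List.pyGetD_eq_getElem l 0 hi0 (by exact_mod_cast hil)
    rcases hbody with hsingle | ⟨j, ⟨hj1, hjl⟩, hinner⟩
    · rw [hgi] at hsingle
      exact Or.inl (hsingle ▸ List.getElem_mem hil')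
    · have hjl' : j.toNat < l.length := by omega
      have hgj : PySem.List.pyGetD l j 0 = l[j.toNat] :=
        PySem.List.pyGetD_eq_getElem l 0 (by omega) (by exact_mod_cast hjl)
      rcases hinner with ⟨hne, hsum⟩ | ⟨k, ⟨hk2, hkl⟩, ⟨⟨hij, hik⟩, hjk⟩, hsum⟩
      · rw [hgi, hgj] at hsum
        have hne' : i.toNat ≠ j.toNat := by omega
        rcases Nat.lt_or_ge i.toNat j.toNat with hlt | hge
        · exact Or.inr (Or.inl ⟨l[i.toNat], l[j.toNat], pair_of_lt hlt hjl', hsum⟩)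
        · have hlt : j.toNat < i.toNat := by omega
          exact Or.inr (Or.inl ⟨l[j.toNat], l[i.toNat], pair_of_lt hlt hil', by omega⟩)
      · have hkl' : k.toNat < l.length := by omega
        have hgk : PySem.List.pyGetD l k 0 = l[k.toNat] :=
          PySem.List.pyGetD_eq_getElem l 0 (by omega) (by exact_mod_cast hkl)
        rw [hgi, hgj, hgk] at hsum
        have hij' : i.toNat ≠ j.toNat := by omega
        have hik' : i.toNat ≠ k.toNat := by omega
        have hjk' : j.toNat ≠ k.toNat := by omega
        refine Or.inr (Or.inr ?_)
        rcases Nat.lt_or_ge i.toNat j.toNat with h1 | h1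
        · rcases Nat.lt_or_ge j.toNat k.toNat with h2 | h2
          · exact ⟨_, _, _, triple_of_lt h1 h2 hkl', hsum⟩
          · rcases Nat.lt_or_ge i.toNat k.toNat with h3 | h3
            · exact ⟨_, _, _, triple_of_lt h3 (by omega) hjl', by omega⟩
            · exact ⟨_, _, _, triple_of_lt (by omega : k.toNat < i.toNat) h1 hjl', by omega⟩
        · rcases Nat.lt_or_ge j.toNat k.toNat with h2 | h2
          · rcases Nat.lt_or_ge i.toNat k.toNat with h3 | h3
            · exact ⟨_, _, _, triple_of_lt (by omega : j.toNat < i.toNat) h3 hkl', by omega⟩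
            · exact ⟨_, _, _, triple_of_lt h2 (by omega : k.toNat < i.toNat) hil', by omega⟩
          · exact ⟨_, _, _, triple_of_lt (by omega : k.toNat < j.toNat) (by omega : j.toNat < i.toNat) hil', by omega⟩
  · rintro (hmem | ⟨a, b, hsub, hab⟩ | ⟨a, b, c, hsub, habc⟩)
    · obtain ⟨m, hm, he⟩ := List.mem_iff_getElem.mp hmem
      refine ⟨(m : Int), ⟨by omega, by exact_mod_cast hm⟩, Or.inl ?_⟩
      rw [PySem.List.pyGetD_natCast, List.getD_eq_getElem l 0 hm]
      exact he
    · obtain ⟨i, j, hij, hj, hei, hej⟩ := pair_to_indices hsub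
      have hil : i < l.length := by omega
      refine ⟨(i : Int), ⟨by omega, by exact_mod_cast hil⟩,
        Or.inr ⟨(j : Int), ⟨by omega, by exact_mod_cast hj⟩, Or.inl ⟨by omega, ?_⟩⟩⟩
      simp only [PySem.List.pyGetD_natCast]
      rw [List.getD_eq_getElem l 0 hil, List.getD_eq_getElem l 0 hj, hei, hej]
      exact hab
    · obtain ⟨i, j, k, hij, hjk, hk, hei, hej, hek⟩ := triple_to_indices hsub
      have hil : i < l.length := by omega
      have hjl : j < l.length := by omega
      refine ⟨(i : Int), ⟨by omega, by exact_mod_cast hil⟩,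
        Or.inr ⟨(j : Int), ⟨by omega, by exact_mod_cast hjl⟩,
          Or.inr ⟨(k : Int), ⟨by omega, by exact_mod_cast hk⟩,
            ⟨⟨by omega, by omega⟩, by omega⟩, ?_⟩⟩⟩
      simp only [PySem.List.pyGetD_natCast]
      rw [List.getD_eq_getElem l 0 hil, List.getD_eq_getElem l 0 hjl, List.getD_eq_getElem l 0 hk,
        hei, hej, hek]
      exact habc

-- ===== VERDICT (by name: the statement is the Claim_ definition above) =====
theorem sommes_sous_ensemble_spec : Claim_equal_sommes_sous_ensemble := by
  intro l n _
  unfold Spec_sommes_sous_ensemble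
  rw [Bool.eq_iff_iff, a_iff, alt_iff]
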